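-- pv_equiv track=rewrite | github.com/HKarpenko/Python | list 2 - 3.py | kolko
-- ===== SOURCE A (Python) =====
-- def kolko(n):
--     kol=[]
--     for i in range(n//2):
--         kol.append([])
--         for j in range(n):
--                 kol[i].append('#')
--     if(n<=5):
--         kol[0][0]=kol[0][n-1]=' '
--     elif(n<10):
--         kol[0][0:2]=kol[0][n-2:n]='  '
--         kol[1][0]=kol[1][n-1]=' '
--     elif(n<15):
--         kol[0][0:4]=kol[0][n-4:n]='    '
--         kol[1][0:2]=kol[1][n-2:n]='  '
--         kol[2][0]=kol[3][0]=kol[2][n-1]=kol[3][n-1]=' '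
--     elif(n<20):
--         kol[0][0:5]=kol[0][n-5:n]='     '
--         kol[1][0:4]=kol[1][n-4:n]='    '
--         kol[2][0:2]=kol[2][n-2:n]='  '
--         kol[3][0]=kol[4][0]=kol[4][n-1]=kol[3][n-1]=' '
--     elif(n<25):
--         kol[0][0:6]=kol[0][n-6:n]='      '
--         kol[1][0:4]=kol[1][n-4:n]=kol[2][0:4]=kol[2][n-4:n]='    '
--         kol[3][0:2]=kol[3][n-2:n]=kol[4][0:2]=kol[4][n-2:n]='  '
--         kol[5][0]=kol[6][0]=kol[6][n-1]=kol[5][n-1]=kol[7][0]=kol[7][n-1]=' '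
--     else:
--         kol[0][0:7]=kol[0][n-7:n]='       '
--         kol[1][0:5]=kol[1][n-5:n]=kol[2][0:5]=kol[2][n-5:n]='     '
--         kol[3][0:3]=kol[3][n-3:n]=kol[4][0:3]=kol[4][n-3:n]='   '
--         kol[5][0:2]=kol[5][n-2:n]=kol[6][0:2]=kol[6][n-2:n]='  '
--         kol[7][0]=kol[8][0]=kol[8][n-1]=kol[7][n-1]=kol[9][0]=kol[9][n-1]=' '
--     return kol
-- ===== SOURCE B (Python) =====
-- def kolko(n):
--     if n <= 5:
--         counts = [1]
--     elif n < 10: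
--         counts = [2, 1]
--     elif n < 15:
--         counts = [4, 2, 1, 1]
--     elif n < 20:
--         counts = [5, 4, 2, 1, 1]
--     elif n < 25:
--         counts = [6, 4, 4, 2, 2, 1, 1, 1]
--     else:
--         counts = [7, 5, 5, 3, 3, 2, 2, 1, 1, 1]
--     rows = []
--     for i in range(n // 2):
--         c = counts[i] if i < len(counts) else 0
--         rows.append([' '] * c + ['#'] * (n - 2 * c) + [' '] * c)
--     return rows
-- ===== Notes on version B (the rewrite author's own statement) =====
-- stated objective: simpler
-- what changed: B replaces A's allocate-then-mutate scheme (build a grid of '#', then carve the border with six hardcoded blocks of chained slice/index assignments) by a per-row border-width table and constructs each row directly as spaces+hashes+spaces; Pre_ excludes exactly n <= 1, where A raises IndexError (it indexes row 0 of an empty grid).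
import Mathlib
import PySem

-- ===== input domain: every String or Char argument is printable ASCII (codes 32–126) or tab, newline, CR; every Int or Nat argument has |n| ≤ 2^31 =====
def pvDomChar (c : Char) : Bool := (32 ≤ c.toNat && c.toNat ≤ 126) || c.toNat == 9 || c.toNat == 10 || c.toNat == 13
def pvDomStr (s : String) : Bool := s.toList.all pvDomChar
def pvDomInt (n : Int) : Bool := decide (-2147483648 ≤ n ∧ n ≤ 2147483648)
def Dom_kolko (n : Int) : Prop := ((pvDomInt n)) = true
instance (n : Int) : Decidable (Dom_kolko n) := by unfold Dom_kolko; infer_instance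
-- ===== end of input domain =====

-- B builds each row directly from a per-row border-width table (construction by formula)
-- instead of A's allocate-then-mutate slice assignments; objective: simpler. No speed claim.

-- ===== PORT A =====

-- Python slice assignment row[a:b] = s; exact for 0 ≤ a ≤ b ≤ len(row), which holds at
-- every use site under Pre_kolko.
def pvSetSlice (row : List String) (a b : Int) (s : List String) : List String :=
  row.take a.toNat ++ s ++ row.drop b.toNat

-- kol.modify: kol[i] := f kol[i]  (indices are in range under Pre_kolko)
def kolko (n : Int) : List (List String) :=
  let kol : List (List String) :=
    (PySem.List.pyRange 0 (PySem.Int.floordiv n 2) 1).foldl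
      (fun kol _ =>
        kol ++ [(PySem.List.pyRange 0 n 1).foldl (fun row _ => row ++ ["#"]) []]) []
  if n ≤ 5 then
    let kol := kol.modify 0 (fun r => PySem.List.pySetD r 0 " ")
    let kol := kol.modify 0 (fun r => PySem.List.pySetD r (n-1) " ")
    kol
  else if n < 10 then
    let kol := kol.modify 0 (fun r => pvSetSlice r 0 2 [" ", " "])
    let kol := kol.modify 0 (fun r => pvSetSlice r (n-2) n [" ", " "])
    let kol := kol.modify 1 (fun r => PySem.List.pySetD r 0 " ")
    let kol := kol.modify 1 (fun r => PySem.List.pySetD r (n-1) " ")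
    kol
  else if n < 15 then
    let kol := kol.modify 0 (fun r => pvSetSlice r 0 4 [" ", " ", " ", " "])
    let kol := kol.modify 0 (fun r => pvSetSlice r (n-4) n [" ", " ", " ", " "])
    let kol := kol.modify 1 (fun r => pvSetSlice r 0 2 [" ", " "])
    let kol := kol.modify 1 (fun r => pvSetSlice r (n-2) n [" ", " "])
    let kol := kol.modify 2 (fun r => PySem.List.pySetD r 0 " ")
    let kol := kol.modify 3 (fun r => PySem.List.pySetD r 0 " ")
    let kol := kol.modify 2 (fun r => PySem.List.pySetD r (n-1) " ")
    let kol := kol.modify 3 (fun r => PySem.List.pySetD r (n-1) " ")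
    kol
  else if n < 20 then
    let kol := kol.modify 0 (fun r => pvSetSlice r 0 5 [" ", " ", " ", " ", " "])
    let kol := kol.modify 0 (fun r => pvSetSlice r (n-5) n [" ", " ", " ", " ", " "])
    let kol := kol.modify 1 (fun r => pvSetSlice r 0 4 [" ", " ", " ", " "])
    let kol := kol.modify 1 (fun r => pvSetSlice r (n-4) n [" ", " ", " ", " "])
    let kol := kol.modify 2 (fun r => pvSetSlice r 0 2 [" ", " "])
    let kol := kol.modify 2 (fun r => pvSetSlice r (n-2) n [" ", " "])
    let kol := kol.modify 3 (fun r => PySem.List.pySetD r 0 " ")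
    let kol := kol.modify 4 (fun r => PySem.List.pySetD r 0 " ")
    let kol := kol.modify 4 (fun r => PySem.List.pySetD r (n-1) " ")
    let kol := kol.modify 3 (fun r => PySem.List.pySetD r (n-1) " ")
    kol
  else if n < 25 then
    let kol := kol.modify 0 (fun r => pvSetSlice r 0 6 [" ", " ", " ", " ", " ", " "])
    let kol := kol.modify 0 (fun r => pvSetSlice r (n-6) n [" ", " ", " ", " ", " ", " "])
    let kol := kol.modify 1 (fun r => pvSetSlice r 0 4 [" ", " ", " ", " "])
    let kol := kol.modify 1 (fun r => pvSetSlice r (n-4) n [" ", " ", " ", " "])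
    let kol := kol.modify 2 (fun r => pvSetSlice r 0 4 [" ", " ", " ", " "])
    let kol := kol.modify 2 (fun r => pvSetSlice r (n-4) n [" ", " ", " ", " "])
    let kol := kol.modify 3 (fun r => pvSetSlice r 0 2 [" ", " "])
    let kol := kol.modify 3 (fun r => pvSetSlice r (n-2) n [" ", " "])
    let kol := kol.modify 4 (fun r => pvSetSlice r 0 2 [" ", " "])
    let kol := kol.modify 4 (fun r => pvSetSlice r (n-2) n [" ", " "])
    let kol := kol.modify 5 (fun r => PySem.List.pySetD r 0 " ")
    let kol := kol.modify 6 (fun r => PySem.List.pySetD r 0 " ")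
    let kol := kol.modify 6 (fun r => PySem.List.pySetD r (n-1) " ")
    let kol := kol.modify 5 (fun r => PySem.List.pySetD r (n-1) " ")
    let kol := kol.modify 7 (fun r => PySem.List.pySetD r 0 " ")
    let kol := kol.modify 7 (fun r => PySem.List.pySetD r (n-1) " ")
    kol
  else
    let kol := kol.modify 0 (fun r => pvSetSlice r 0 7 [" ", " ", " ", " ", " ", " ", " "])
    let kol := kol.modify 0 (fun r => pvSetSlice r (n-7) n [" ", " ", " ", " ", " ", " ", " "])
    let kol := kol.modify 1 (fun r => pvSetSlice r 0 5 [" ", " ", " ", " ", " "])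
    let kol := kol.modify 1 (fun r => pvSetSlice r (n-5) n [" ", " ", " ", " ", " "])
    let kol := kol.modify 2 (fun r => pvSetSlice r 0 5 [" ", " ", " ", " ", " "])
    let kol := kol.modify 2 (fun r => pvSetSlice r (n-5) n [" ", " ", " ", " ", " "])
    let kol := kol.modify 3 (fun r => pvSetSlice r 0 3 [" ", " ", " "])
    let kol := kol.modify 3 (fun r => pvSetSlice r (n-3) n [" ", " ", " "])
    let kol := kol.modify 4 (fun r => pvSetSlice r 0 3 [" ", " ", " "])
    let kol := kol.modify 4 (fun r => pvSetSlice r (n-3) n [" ", " ", " "])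
    let kol := kol.modify 5 (fun r => pvSetSlice r 0 2 [" ", " "])
    let kol := kol.modify 5 (fun r => pvSetSlice r (n-2) n [" ", " "])
    let kol := kol.modify 6 (fun r => pvSetSlice r 0 2 [" ", " "])
    let kol := kol.modify 6 (fun r => pvSetSlice r (n-2) n [" ", " "])
    let kol := kol.modify 7 (fun r => PySem.List.pySetD r 0 " ")
    let kol := kol.modify 8 (fun r => PySem.List.pySetD r 0 " ")
    let kol := kol.modify 8 (fun r => PySem.List.pySetD r (n-1) " ")
    let kol := kol.modify 7 (fun r => PySem.List.pySetD r (n-1) " ")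
    let kol := kol.modify 9 (fun r => PySem.List.pySetD r 0 " ")
    let kol := kol.modify 9 (fun r => PySem.List.pySetD r (n-1) " ")
    kol

-- ===== PORT B =====
def kolko_alt (n : Int) : List (List String) :=
  let counts : List Int :=
    if n ≤ 5 then [1]
    else if n < 10 then [2, 1]
    else if n < 15 then [4, 2, 1, 1]
    else if n < 20 then [5, 4, 2, 1, 1]
    else if n < 25 then [6, 4, 4, 2, 2, 1, 1, 1]
    else [7, 5, 5, 3, 3, 2, 2, 1, 1, 1]
  (PySem.List.pyRange 0 (PySem.Int.floordiv n 2) 1).foldl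
    (fun rows i =>
      let c : Int := if i < (counts.length : Int) then PySem.List.pyGetD counts i 0 else 0
      rows ++ [List.replicate c.toNat " " ++ List.replicate (n - 2 * c).toNat "#"
                ++ List.replicate c.toNat " "]) []

-- ===== PRECONDITION & SPEC =====
-- Pre_ excludes exactly n ≤ 1, where A raises IndexError (the grid has no row 0).
def Pre_kolko (n : Int) : Prop := 2 ≤ n
instance (n : Int) : Decidable (Pre_kolko n) := by unfold Pre_kolko; infer_instance
def pvWitness_kolko : Int := 7

def Spec_kolko (n : Int) (out : List (List String)) : Prop := out = kolko_alt n
instance (n : Int) (out : List (List String)) : Decidable (Spec_kolko n out) := by unfold Spec_kolko; infer_instance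

-- ===== CLAIM (what is proved, stated in full; the proofs are below) =====
def Claim_equal_kolko : Prop := ∀ (n : Int), Dom_kolko n → Pre_kolko n → Spec_kolko n (kolko n)

-- ===== LEMMAS AND PROOFS =====

theorem carve2 (n c : Int) (h1 : 0 < c) (h2 : 2*c ≤ n) (s : List String) (hs : s = List.replicate c.toNat " ") :
    pvSetSlice (pvSetSlice (List.replicate n.toNat "#") 0 c s) (n - c) n s
    = List.replicate c.toNat " " ++ List.replicate (n - 2*c).toNat "#" ++ List.replicate c.toNat " " := by
  subst hs
  unfold pvSetSlice
  simp only [Int.toNat_zero, List.take_zero, List.nil_append, List.drop_replicate]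
  rw [List.take_append, List.drop_append]
  rw [List.take_replicate, List.take_replicate, List.drop_replicate, List.drop_replicate]
  simp only [List.length_replicate]
  have e1 : min (n-c).toNat c.toNat = c.toNat := by omega
  have e2 : (n-c).toNat - c.toNat = (n - 2*c).toNat := by omega
  have e3 : min ((n-2*c).toNat) (n.toNat - c.toNat) = (n-2*c).toNat := by omega
  have e4 : c.toNat - n.toNat = 0 := by omega
  rw [e2, e1, e3, e4]
  simp [List.replicate]

theorem carve1 (n : Int) (h : 2 ≤ n) :
    PySem.List.pySetD (PySem.List.pySetD (List.replicate n.toNat "#") 0 " ") (n-1) " "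
    = List.replicate 1 " " ++ List.replicate (n - 2).toNat "#" ++ List.replicate 1 " " := by
  rw [PySem.List.pySetD_of_nonneg _ _ (by omega : (0:Int) ≤ 0),
      PySem.List.pySetD_of_nonneg _ _ (by omega : (0:Int) ≤ n - 1)]
  have hN : n.toNat = 1 + ((n-2).toNat + 1) := by omega
  rw [hN, List.replicate_add, List.replicate_add]
  rw [List.set_append_left _ _ (by simp)]
  have h1 : (n-1).toNat = 1 + (n-2).toNat := by omega
  rw [h1, List.set_append_right _ _ (by simp)]
  rw [List.set_append_right _ _ (by simp)]
  simp [List.replicate]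

theorem kolko_big (n : Int) (h : 25 ≤ n) : kolko n = kolko_alt n := by
  have hfd : PySem.Int.floordiv n 2 = n / 2 := PySem.Int.floordiv_eq_ediv_of_pos (by omega)
  have hm : 12 ≤ n / 2 := by omega
  have hrow : (PySem.List.pyRange 0 n 1).foldl (fun row _ => row ++ ["#"]) ([] : List String)
      = List.replicate n.toNat "#" := by
    rw [PySem.List.foldl_append_singleton_eq_map (fun _ => "#")]
    simp [List.map_const', PySem.List.length_pyRange_one]
  have hgrid : (PySem.List.pyRange 0 (n/2) 1).foldl
      (fun kol _ => kol ++ [(PySem.List.pyRange 0 n 1).foldl (fun row _ => row ++ ["#"]) []]) []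
      = List.replicate (n/2).toNat (List.replicate n.toNat "#") := by
    rw [PySem.List.foldl_append_singleton_eq_map
          (fun _ => (PySem.List.pyRange 0 n 1).foldl (fun row _ => row ++ ["#"]) [])]
    simp [hrow, List.map_const', PySem.List.length_pyRange_one]
  obtain ⟨K, hK⟩ : ∃ K, (n/2).toNat = 10 + K := ⟨(n/2).toNat - 10, by omega⟩
  have hsplit : List.replicate (n/2).toNat (List.replicate n.toNat "#")
      = List.replicate n.toNat "#" :: List.replicate n.toNat "#" :: List.replicate n.toNat "#" ::
        List.replicate n.toNat "#" :: List.replicate n.toNat "#" :: List.replicate n.toNat "#" ::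
        List.replicate n.toNat "#" :: List.replicate n.toNat "#" :: List.replicate n.toNat "#" ::
        List.replicate n.toNat "#" :: List.replicate K (List.replicate n.toNat "#") := by
    rw [hK, List.replicate_add]; rfl
  have c1 : ¬ (n ≤ 5) := by omega
  have c2 : ¬ (n < 10) := by omega
  have c3 : ¬ (n < 15) := by omega
  have c4 : ¬ (n < 20) := by omega
  have c5 : ¬ (n < 25) := by omega
  unfold kolko kolko_alt
  simp only [hfd, hgrid, hsplit, if_neg c1, if_neg c2, if_neg c3, if_neg c4, if_neg c5,
    List.modify]
  rw [PySem.List.foldl_append_singleton_eq_map]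
  rw [PySem.List.pyRange_one_append 0 10 (n/2) (by omega) (by omega), List.map_append]
  rw [show PySem.List.pyRange 0 10 1 = [0,1,2,3,4,5,6,7,8,9] from by decide]
  simp only [List.map_cons, List.map_nil]
  norm_num [PySem.List.pyGetD_ofNat']
  refine ⟨?_, ?_, ?_, ?_, ?_, ?_⟩
  · rw [carve2 n 7 (by omega) (by omega) _ (by decide)]; norm_num
  · rw [carve2 n 5 (by omega) (by omega) _ (by decide)]; norm_num
  · rw [carve2 n 3 (by omega) (by omega) _ (by decide)]; norm_num
  · rw [carve2 n 2 (by omega) (by omega) _ (by decide)]; norm_num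
  · rw [carve1 n (by omega)]; norm_num [List.replicate]
  · symm
    apply List.eq_replicate_iff.mpr
    constructor
    · simp [PySem.List.length_pyRange_one]; omega
    · intro x hx
      obtain ⟨i, hi, rfl⟩ := List.mem_map.mp hx
      have hge := (PySem.List.mem_pyRange_one.mp hi).1
      rw [if_neg (by omega), if_neg (by omega)]
      norm_num


-- ===== VERDICT (by name: the statement is the Claim_ definition above) =====
theorem kolko_spec : Claim_equal_kolko := by
  intro n _ hpre
  unfold Spec_kolko
  by_cases h : n < 25
  · unfold Pre_kolko at hpre
    interval_cases n <;> decide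
  · exact kolko_big n (by omega)
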